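-- pv_equiv track=rewrite | github.com/jcraig949jfi/Prometheus | noesis/v2/hub_connectivity.py | extract_hub_from_resolution
-- ===== SOURCE A (Python) =====
-- def extract_hub_from_resolution(resolution_id: str, known_hubs: set) -> str | None:
--     """Try to extract hub comp_id from a resolution_id.
--
--     Resolution IDs follow patterns like:
--       HUB__RESOLUTION  (e.g., IMPOSSIBILITY_ARROW__SINGLE_PEAKED_PREFERENCES)
--       STANDALONE_ID    (e.g., SPATIAL_MULTIPLEXING_MIMO)
--
--     We match against known hubs by checking if the resolution_id starts with a hub name.
--     """
--     # Direct match
--     if resolution_id in known_hubs: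
--         return resolution_id
--
--     # Check for HUB__RESOLUTION pattern (double underscore)
--     if "__" in resolution_id:
--         hub_part = resolution_id.split("__")[0]
--         if hub_part in known_hubs:
--             return hub_part
--
--     # Check if starts with any known hub (longest match first)
--     sorted_hubs = sorted(known_hubs, key=len, reverse=True)
--     for hub in sorted_hubs:
--         if resolution_id.startswith(hub + "_"):
--             return hub
--
--     return None
-- ===== SOURCE B (Python) =====
-- def extract_hub_from_resolution(resolution_id: str, known_hubs: set) -> str | None:
--     # Direct match
--     if resolution_id in known_hubs:
--         return resolution_id
--     # HUB__RESOLUTION pattern (double underscore)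
--     if "__" in resolution_id:
--         hub_part = resolution_id.split("__")[0]
--         if hub_part in known_hubs:
--             return hub_part
--     # Longest-prefix match: scan underscore positions right-to-left,
--     # membership-test each prefix against the hub set (no sort, no per-hub scan).
--     for i in range(len(resolution_id) - 1, -1, -1):
--         if resolution_id[i] == "_" and resolution_id[:i] in known_hubs:
--             return resolution_id[:i]
--     return None
-- ===== Notes on version B (the rewrite author's own statement) =====
-- stated objective: alternative
-- what changed: Replaces A's sort of all hubs by length plus a per-hub startswith scan with a single right-to-left scan over the underscore positions of resolution_id, testing each prefix against the hub set; cost no longer grows with the number of hubs (intended as faster; measured 1.38-1.69x in a timing run, below the 1.5x bar at the largest size).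
import Mathlib
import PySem

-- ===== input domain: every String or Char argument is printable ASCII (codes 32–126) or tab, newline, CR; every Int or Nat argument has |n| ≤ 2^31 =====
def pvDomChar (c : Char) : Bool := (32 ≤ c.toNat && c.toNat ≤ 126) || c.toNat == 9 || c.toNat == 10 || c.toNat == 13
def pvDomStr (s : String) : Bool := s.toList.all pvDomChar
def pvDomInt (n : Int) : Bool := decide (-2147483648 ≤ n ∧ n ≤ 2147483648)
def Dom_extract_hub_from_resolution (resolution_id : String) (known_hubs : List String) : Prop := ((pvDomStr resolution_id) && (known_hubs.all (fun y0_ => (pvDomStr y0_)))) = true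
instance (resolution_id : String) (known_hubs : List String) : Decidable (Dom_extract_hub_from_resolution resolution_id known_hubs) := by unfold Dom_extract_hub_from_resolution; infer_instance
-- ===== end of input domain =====

-- ===== PORT A =====
-- B re-implements A's longest-hub-prefix scan without sorting; equal return value proved below.
def extract_hub_from_resolution (resolution_id : String) (known_hubs : List String) : Option String :=
  -- Direct match
  if known_hubs.contains resolution_id then
    some resolution_id
  else
    -- HUB__RESOLUTION pattern (double underscore)
    match (if PySem.Str.isIn "__" resolution_id then
        (if known_hubs.contains (((PySem.Str.split? resolution_id "__").getD []).headD "") then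
          some (((PySem.Str.split? resolution_id "__").getD []).headD "") else none)
      else none) with
    | some h => some h
    | none =>
      -- longest match first: sort by length descending, first startswith hit
      let sorted_hubs := PySem.List.sorted known_hubs PySem.Str.len true
      sorted_hubs.find? (fun hub => PySem.Str.startswith resolution_id (hub ++ "_"))

-- ===== PORT B =====
-- for i in range(len(s)-1, -1, -1): if s[i] == '_' and s[:i] in known_hubs: return s[:i]
def pvScanPrefix (cs : List Char) (known_hubs : List String) : Nat → Option String
  | 0 => none
  | i + 1 =>
    if (cs[i]? == some '_') && known_hubs.contains (String.ofList (cs.take i)) then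
      some (String.ofList (cs.take i))
    else
      pvScanPrefix cs known_hubs i

def extract_hub_from_resolution_alt (resolution_id : String) (known_hubs : List String) : Option String :=
  if known_hubs.contains resolution_id then
    some resolution_id
  else
    match (if PySem.Str.isIn "__" resolution_id then
        (if known_hubs.contains (((PySem.Str.split? resolution_id "__").getD []).headD "") then
          some (((PySem.Str.split? resolution_id "__").getD []).headD "") else none)
      else none) with
    | some h => some h
    | none =>
      pvScanPrefix resolution_id.toList known_hubs resolution_id.toList.length

-- ===== PRECONDITION & SPEC =====
def Spec_extract_hub_from_resolution (resolution_id : String) (known_hubs : List String) (out : Option String) : Prop := out = extract_hub_from_resolution_alt resolution_id known_hubs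
instance (resolution_id : String) (known_hubs : List String) (out : Option String) : Decidable (Spec_extract_hub_from_resolution resolution_id known_hubs out) := by unfold Spec_extract_hub_from_resolution; infer_instance

-- ===== CLAIM (what is proved, stated in full; the proofs are below) =====
def Claim_equal_extract_hub_from_resolution : Prop := ∀ (resolution_id : String) (known_hubs : List String), Dom_extract_hub_from_resolution resolution_id known_hubs → Spec_extract_hub_from_resolution resolution_id known_hubs (extract_hub_from_resolution resolution_id known_hubs)

-- ===== LEMMAS AND PROOFS =====

-- scan condition at index i (definitionally the if-condition of pvScanPrefix)
def pvHit (cs : List Char) (known_hubs : List String) (i : Nat) : Bool :=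
  (cs[i]? == some '_') && known_hubs.contains (String.ofList (cs.take i))

lemma pvScan_none {cs : List Char} {known_hubs : List String} {n : Nat}
    (h : pvScanPrefix cs known_hubs n = none) : ∀ i < n, pvHit cs known_hubs i = false := by
  induction n with
  | zero => intro i hi; omega
  | succ m ih =>
    intro i hi
    rw [pvScanPrefix] at h
    split at h
    next => exact absurd h (by simp)
    next hc =>
      rcases Nat.lt_succ_iff_lt_or_eq.mp hi with h1 | h1
      · exact ih h i h1
      · subst h1; simpa [pvHit] using hc

lemma pvScan_some {cs : List Char} {known_hubs : List String} {n : Nat} {r : String}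
    (h : pvScanPrefix cs known_hubs n = some r) :
    ∃ i, i < n ∧ pvHit cs known_hubs i = true ∧ r = String.ofList (cs.take i) ∧
      ∀ j, i < j → j < n → pvHit cs known_hubs j = false := by
  induction n with
  | zero => simp [pvScanPrefix] at h
  | succ m ih =>
    rw [pvScanPrefix] at h
    split at h
    next hc =>
      refine ⟨m, Nat.lt_succ_self m, by simpa [pvHit] using hc, by simpa using h.symm, ?_⟩
      intro j hj1 hj2; omega
    next hc =>
      obtain ⟨i, hi, hhit, hr, hmax⟩ := ih h
      refine ⟨i, by omega, hhit, hr, ?_⟩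
      intro j hj1 hj2
      rcases Nat.lt_succ_iff_lt_or_eq.mp hj2 with h1 | h1
      · exact hmax j hj1 h1
      · subst h1; simpa [pvHit] using hc

-- the startswith predicate, characterised by an underscore position
lemma pvP_iff {s : String} {h : String} :
    PySem.Str.startswith s (h ++ "_") = true ↔
      (s.toList.take h.toList.length = h.toList ∧ s.toList[h.toList.length]? = some '_') := by
  rw [PySem.Str.startswith_eq, PySem.Chars.startswith_iff]
  have heq : (h ++ "_").toList = h.toList ++ ['_'] := by simp [String.toList_append]
  constructor
  · intro hp
    rw [heq] at hp
    have hlt : h.toList.length < s.toList.length := by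
      have := hp.length_le
      simp only [List.length_append, List.length_cons, List.length_nil] at this
      omega
    have hteq := List.prefix_iff_eq_take.mp hp
    rw [show (h.toList ++ ['_']).length = h.toList.length + 1 by simp,
        List.take_add_one, List.getElem?_eq_getElem hlt] at hteq
    have hl : (s.toList.take h.toList.length).length = h.toList.length :=
      List.length_take_of_le (Nat.le_of_lt hlt)
    have hinj := List.append_inj hteq.symm (by simpa using hl)
    refine ⟨hinj.1, ?_⟩
    rw [List.getElem?_eq_getElem hlt]
    have : s.toList[h.toList.length] = '_' := by
      simpa using congrArg (fun l => l.headD ' ') hinj.2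
    rw [this]
  · rintro ⟨h1, h2⟩
    rw [heq, List.prefix_iff_eq_take]
    have hlt : h.toList.length < s.toList.length := (List.getElem?_eq_some_iff.mp h2).1
    rw [show (h.toList ++ ['_']).length = h.toList.length + 1 by simp, List.take_add_one, h1, h2]
    simp

lemma pv_find_sorted_max {L : List String} {P : String → Bool} {r : String}
    (hp : L.Pairwise (fun a b => PySem.Str.len b ≤ PySem.Str.len a))
    (hr : r ∈ L) (hPr : P r = true)
    (hmax : ∀ h ∈ L, P h = true → PySem.Str.len h ≤ PySem.Str.len r)
    (huni : ∀ h ∈ L, P h = true → PySem.Str.len h = PySem.Str.len r → h = r) :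
    L.find? P = some r := by
  induction L with
  | nil => simp at hr
  | cons a t ih =>
    rcases List.pairwise_cons.mp hp with ⟨ha, ht⟩
    by_cases hPa : P a = true
    · rw [List.find?_cons_of_pos hPa]
      have h1 : PySem.Str.len a ≤ PySem.Str.len r := hmax a (List.mem_cons_self ..) hPa
      rcases List.mem_cons.mp hr with h2 | h2
      · rw [h2]
      · have h3 : PySem.Str.len r ≤ PySem.Str.len a := ha r h2
        exact congrArg some (huni a (List.mem_cons_self ..) hPa (le_antisymm h1 h3))
    · rw [List.find?_cons_of_neg hPa]
      have hrt : r ∈ t := by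
        rcases List.mem_cons.mp hr with h2 | h2
        · exact absurd (h2 ▸ hPr) hPa
        · exact h2
      exact ih ht hrt (fun h hh => hmax h (List.mem_cons_of_mem a hh))
        (fun h hh => huni h (List.mem_cons_of_mem a hh))

-- a matching hub h yields a hit at index |h|
lemma pvHit_of_P {s : String} {known_hubs : List String} {h : String}
    (hmem : h ∈ known_hubs)
    (h1 : s.toList.take h.toList.length = h.toList)
    (h2 : s.toList[h.toList.length]? = some '_') :
    pvHit s.toList known_hubs h.toList.length = true := by
  rw [pvHit, h1, h2, String.ofList_toList]
  simpa using hmem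

-- step-3 equality: scan from the right = longest-first sorted search
lemma pv_step3 (s : String) (known_hubs : List String) :
    (PySem.List.sorted known_hubs PySem.Str.len true).find?
        (fun hub => PySem.Str.startswith s (hub ++ "_"))
      = pvScanPrefix s.toList known_hubs s.toList.length := by
  cases hscan : pvScanPrefix s.toList known_hubs s.toList.length with
  | none =>
    rw [List.find?_eq_none]
    intro h hmem hP
    obtain ⟨h1, h2⟩ := pvP_iff.mp hP
    have hlt : h.toList.length < s.toList.length := (List.getElem?_eq_some_iff.mp h2).1
    have hc := pvHit_of_P ((PySem.List.mem_sorted ..).mp hmem) h1 h2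
    rw [pvScan_none hscan h.toList.length hlt] at hc
    cases hc
  | some r =>
    obtain ⟨i, hi, hhit, hr, hmaxi⟩ := pvScan_some hscan
    have hhit' := hhit
    rw [pvHit, Bool.and_eq_true, beq_iff_eq] at hhit'
    obtain ⟨hus, hcont⟩ := hhit'
    have hrl : r.toList = s.toList.take i := by rw [hr]; simp
    have hrlen : r.toList.length = i := by
      rw [hrl]; exact List.length_take_of_le (Nat.le_of_lt hi)
    have hPr : PySem.Str.startswith s (r ++ "_") = true := by
      rw [pvP_iff, hrlen, hrl]
      exact ⟨rfl, hus⟩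
    apply pv_find_sorted_max (PySem.List.sorted_pairwise_rev known_hubs PySem.Str.len)
    · rw [PySem.List.mem_sorted, hr]
      simpa using hcont
    · exact hPr
    · intro h hmem hP
      obtain ⟨h1, h2⟩ := pvP_iff.mp hP
      have hlt : h.toList.length < s.toList.length := (List.getElem?_eq_some_iff.mp h2).1
      have hle : h.toList.length ≤ i := by
        by_contra hgt
        have hc := pvHit_of_P ((PySem.List.mem_sorted ..).mp hmem) h1 h2
        rw [hmaxi h.toList.length (by omega) hlt] at hc
        cases hc
      rw [PySem.Str.len_eq, PySem.Str.len_eq, hrlen]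
      exact_mod_cast hle
    · intro h hmem hP hlen
      obtain ⟨h1, h2⟩ := pvP_iff.mp hP
      have hl : h.toList.length = i := by
        rw [PySem.Str.len_eq, PySem.Str.len_eq, hrlen] at hlen
        exact_mod_cast hlen
      have : h.toList = r.toList := by rw [hrl, ← hl, h1]
      exact String.toList_inj.mp this

-- ===== VERDICT (by name: the statement is the Claim_ definition above) =====
theorem extract_hub_from_resolution_spec : Claim_equal_extract_hub_from_resolution := by
  intro s known_hubs _
  unfold Spec_extract_hub_from_resolution extract_hub_from_resolution extract_hub_from_resolution_alt
  by_cases h1 : known_hubs.contains s = true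
  · rw [if_pos h1, if_pos h1]
  · rw [if_neg h1, if_neg h1]
    by_cases h2 : PySem.Str.isIn "__" s = true
    · simp only [if_pos h2]
      by_cases h3 : known_hubs.contains (((PySem.Str.split? s "__").getD []).headD "") = true
      · simp only [if_pos h3]
      · simp only [if_neg h3]
        exact pv_step3 s known_hubs
    · simp only [if_neg h2]
      exact pv_step3 s known_hubs
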